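-- pv_equiv track=rewrite | github.com/muhenan/Python-Algo | DateStructureAlgoOOD/DS/Array/array-operations-leetcode-2460.py | applyOperations_inPlace
-- ===== SOURCE A (Python) =====
-- from typing import List
--
-- def applyOperations_inPlace(nums: List[int]) -> List[int]:
--     """
--     方法二：原地修改（一次遍历）
--     Time: O(n)
--     Space: O(1)
--     """
--     length = len(nums)
--     index = 0  # 记录非零元素应该放置的位置
--
--     # 一次遍历同时完成两个任务
--     for i in range(length - 1):
--         # 任务1：处理相邻相等的元素
--         if nums[i] == nums[i + 1]:
--             nums[i] *= 2
--             nums[i + 1] = 0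
--
--         # 任务2：如果当前元素非零，移动到正确位置
--         if nums[i]:
--             old = nums[i]      # 保存当前值
--             nums[i] = 0        # 清空当前位置
--             nums[index] = old  # 将值放到正确位置
--             index += 1         # 更新下一个非零元素的位置
--
--     # 特殊处理最后一个元素（因为它没有下一个元素可比较）
--     if nums[-1]:
--         old = nums[-1]
--         nums[-1] = 0
--         nums[index] = old
--
--     return nums
-- ===== SOURCE B (Python) =====
-- from typing import List
--
-- def applyOperations_inPlace(nums: List[int]) -> List[int]:
--     # Pass 1: double equal adjacent pairs (same as the statement's first operation).
--     for i in range(len(nums) - 1):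
--         if nums[i] == nums[i + 1]:
--             nums[i] *= 2
--             nums[i + 1] = 0
--     # Pass 2: compact — keep the non-zeros in order, pad with zeros, in place.
--     nonzeros = [x for x in nums if x != 0]
--     nums[:] = nonzeros + [0] * (len(nums) - len(nonzeros))
--     return nums
-- ===== Notes on version B (the rewrite author's own statement) =====
-- stated objective: simpler
-- what changed: A fuses doubling and zero-compaction into one index-juggling pass with a write pointer; B does the doubling pass alone and then compacts declaratively by filtering the non-zeros and zero-padding via slice assignment.
import Mathlib
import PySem

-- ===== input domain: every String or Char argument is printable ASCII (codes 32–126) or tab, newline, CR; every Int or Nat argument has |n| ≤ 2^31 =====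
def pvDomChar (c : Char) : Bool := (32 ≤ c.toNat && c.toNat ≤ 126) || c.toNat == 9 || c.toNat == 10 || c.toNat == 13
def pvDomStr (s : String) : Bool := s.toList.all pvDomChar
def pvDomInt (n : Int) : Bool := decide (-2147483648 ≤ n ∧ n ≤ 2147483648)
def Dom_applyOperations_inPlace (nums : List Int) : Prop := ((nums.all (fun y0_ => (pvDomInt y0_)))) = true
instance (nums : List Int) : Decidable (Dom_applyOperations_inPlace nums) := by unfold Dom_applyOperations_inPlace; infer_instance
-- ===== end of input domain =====

-- B replaces A's fused double-and-compact single pass by two separate passes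
-- (double adjacent equal pairs, then filter non-zeros and zero-pad) — objective: simpler.
-- Equivalence is about the RETURN value; both Pythons mutate the argument list in place.


-- ===== PORT A =====
-- loop body of A's fused pass: state (nums, index); pyGetD/pySetD are exact here
-- because every index the loop touches is in range (i, i+1 ≤ len-1; index ≤ i).
def stepA (s : List Int × Int) (i : Int) : List Int × Int :=
  let a := s.1
  let index := s.2
  -- 任务1: double equal adjacent elements
  let a := if PySem.List.pyGetD a i 0 = PySem.List.pyGetD a (i + 1) 0 then
             PySem.List.pySetD (PySem.List.pySetD a i (PySem.List.pyGetD a i 0 * 2)) (i + 1) 0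
           else a
  -- 任务2: move the current element to `index` if non-zero
  if PySem.List.pyGetD a i 0 ≠ 0 then
    let old := PySem.List.pyGetD a i 0
    let a := PySem.List.pySetD a i 0
    let a := PySem.List.pySetD a index old
    (a, index + 1)
  else (a, index)

-- the read of the last element (Python index -1) is exact under Pre_ (nums ≠ []):
-- pyGetD/pySetD default only on the empty list.
def applyOperations_inPlace (nums : List Int) : List Int :=
  let length : Int := nums.length
  let st := (PySem.List.pyRange 0 (length - 1) 1).foldl stepA (nums, 0)
  let a := st.1
  let index := st.2
  if PySem.List.pyGetD a (-1) 0 ≠ 0 then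
    let old := PySem.List.pyGetD a (-1) 0
    let a := PySem.List.pySetD a (-1) 0
    PySem.List.pySetD a index old
  else a

-- ===== PORT B =====
-- loop body of B's first pass (doubling only)
def stepB (a : List Int) (i : Int) : List Int :=
  if PySem.List.pyGetD a i 0 = PySem.List.pyGetD a (i + 1) 0 then
    PySem.List.pySetD (PySem.List.pySetD a i (PySem.List.pyGetD a i 0 * 2)) (i + 1) 0
  else a

def applyOperations_inPlace_alt (nums : List Int) : List Int :=
  let a := (PySem.List.pyRange 0 ((nums.length : Int) - 1) 1).foldl stepB nums
  let nonzeros := a.filter (fun x => x ≠ 0)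
  nonzeros ++ List.replicate (nums.length - nonzeros.length) 0

-- ===== PRECONDITION & SPEC =====
-- Pre_ excludes exactly the empty list, on which A raises IndexError when reading the last element (negative index -1).
def Pre_applyOperations_inPlace (nums : List Int) : Prop := nums ≠ []
instance (nums : List Int) : Decidable (Pre_applyOperations_inPlace nums) := by
  unfold Pre_applyOperations_inPlace; infer_instance
def pvWitness_applyOperations_inPlace : List Int := [1, 2, 2, 1, 1, 0]

def Spec_applyOperations_inPlace (nums : List Int) (out : List Int) : Prop :=
  out = applyOperations_inPlace_alt nums
instance (nums : List Int) (out : List Int) : Decidable (Spec_applyOperations_inPlace nums out) := by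
  unfold Spec_applyOperations_inPlace; infer_instance

-- ===== CLAIM (what is proved, stated in full; the proofs are below) =====
def Claim_equal_applyOperations_inPlace : Prop :=
  ∀ (nums : List Int), Dom_applyOperations_inPlace nums →
    Pre_applyOperations_inPlace nums →
      Spec_applyOperations_inPlace nums (applyOperations_inPlace nums)

-- ===== LEMMAS AND PROOFS =====

def dblGo (x : Int) : List Int → List Int
  | [] => [x]
  | y :: t => if x = y then 2 * x :: dblGo 0 t else x :: dblGo y t
def absA (front : List Int) (z : Nat) (x : Int) : List Int → List Int × Nat × Int
  | [] => (front, z, x)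
  | y :: t =>
    let x' := if x = y then 2 * x else x
    let y' := if x = y then 0 else y
    if x' ≠ 0 then absA (front ++ [x']) z y' t else absA front (z + 1) y' t

def outA (s : List Int × Nat × Int) : List Int :=
  if s.2.2 ≠ 0 then s.1 ++ [s.2.2] ++ List.replicate s.2.1 0
  else s.1 ++ List.replicate s.2.1 0 ++ [0]

theorem absA_out (tl : List Int) (x : Int) (front : List Int) (z : Nat) :
    outA (absA front z x tl) =
    front ++ (dblGo x tl).filter (fun v => v ≠ 0) ++
      List.replicate (z + (dblGo x tl).countP (fun v => v = 0)) 0 := by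
  induction tl generalizing front z x with
  | nil =>
    by_cases hx : x = 0 <;>
      simp [absA, outA, dblGo, hx, List.replicate_succ', ← List.append_assoc]
  | cons y t ih =>
    by_cases hxy : x = y
    · subst hxy
      by_cases hx : x = 0
      · subst hx
        simp only [absA, dblGo]
        simp only [mul_zero, ite_true, if_pos rfl, ne_eq, not_true_eq_false, if_false, ite_false,
          not_false_eq_true]
        rw [ih]
        simp [Nat.add_assoc, Nat.add_comm, Nat.add_left_comm]
      · have h2 : (2 : Int) * x ≠ 0 := by omega
        simp only [absA, dblGo, if_pos rfl, ne_eq, h2, not_false_eq_true, ite_true]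
        rw [ih]
        simp [h2, List.append_assoc]
    · simp only [absA, dblGo, if_neg hxy]
      by_cases hx : x = 0
      · rw [if_neg (by simp [hx])]
        rw [ih]
        simp [hx, Nat.add_assoc, Nat.add_comm, Nat.add_left_comm]
      · rw [if_pos hx]
        rw [ih]
        simp [hx, List.append_assoc]

theorem getD_append_length (p t : List Int) (x d : Int) :
    (p ++ x :: t).getD p.length d = x := by
  simp [List.getD]

theorem set_append_length (p t : List Int) (x v : Int) :
    (p ++ x :: t).set p.length v = p ++ v :: t := by
  induction p with
  | nil => simp
  | cons h q ih => simp [ih]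

theorem getD_append_length_succ (p t : List Int) (x y d : Int) :
    (p ++ x :: y :: t).getD (p.length + 1) d = y := by
  have h := getD_append_length (p ++ [x]) t y d
  simpa [List.append_assoc] using h

theorem set_append_length_succ (p t : List Int) (x y v : Int) :
    (p ++ x :: y :: t).set (p.length + 1) v = p ++ x :: v :: t := by
  have h := set_append_length (p ++ [x]) t y v
  simpa [List.append_assoc] using h

theorem rep_zero_cons (z : Nat) (l : List Int) :
    List.replicate z (0 : Int) ++ 0 :: l = 0 :: (List.replicate z 0 ++ l) := by
  induction z with
  | zero => simp
  | succ n ih => simp [List.replicate_succ, ih]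

theorem stepB_eq (p t : List Int) (x y : Int) :
    stepB (p ++ x :: y :: t) (p.length : Int) =
      if x = y then p ++ 2 * x :: 0 :: t else p ++ x :: y :: t := by
  have h1 : ((p.length : Int) + 1) = ((p.length + 1 : Nat) : Int) := by push_cast; ring
  unfold stepB
  rw [h1]
  simp only [PySem.List.pyGetD_natCast, PySem.List.pySetD_natCast,
    getD_append_length, getD_append_length_succ]
  split
  · rw [set_append_length]
    rw [set_append_length_succ]
    simp [mul_comm]
  · rfl

theorem sim_B (tl : List Int) (x : Int) (p : List Int) :
    (PySem.List.pyRange (p.length : Int) ((p.length : Int) + tl.length) 1).foldl stepB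
        (p ++ x :: tl) = p ++ dblGo x tl := by
  induction tl generalizing p x with
  | nil =>
    rw [PySem.List.pyRange_one_eq_nil (by simp)]
    simp [dblGo]
  | cons y t ih =>
    rw [PySem.List.pyRange_one_cons (by simp)]
    rw [List.foldl_cons, stepB_eq]
    by_cases hxy : x = y
    · rw [if_pos hxy]
      have h1 : (p.length : Int) + 1 = (((p ++ [2 * x]).length : Nat) : Int) := by
        push_cast; simp
      have h2 : (p.length : Int) + ((y :: t).length : Int) =
          (((p ++ [2 * x]).length : Nat) : Int) + (t.length : Int) := by
        push_cast; simp; ring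
      rw [h2, h1]
      have h3 : p ++ 2 * x :: 0 :: t = (p ++ [2 * x]) ++ 0 :: t := by
        simp [List.append_assoc]
      rw [h3, ih]
      simp [dblGo, hxy, List.append_assoc]
    · rw [if_neg hxy]
      have h1 : (p.length : Int) + 1 = (((p ++ [x]).length : Nat) : Int) := by push_cast; simp
      have h2 : (p.length : Int) + ((y :: t).length : Int) =
          (((p ++ [x]).length : Nat) : Int) + (t.length : Int) := by push_cast; simp; ring
      rw [h2, h1]
      have h3 : p ++ x :: y :: t = (p ++ [x]) ++ y :: t := by simp [List.append_assoc]
      rw [h3, ih]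
      simp [dblGo, hxy, List.append_assoc]

theorem stepA_eq (front : List Int) (z : Nat) (x y : Int) (t : List Int) :
    stepA (front ++ List.replicate z 0 ++ x :: y :: t, (front.length : Int))
        ((front.length : Int) + (z : Int)) =
      (let x' := if x = y then 2 * x else x
       let y' := if x = y then 0 else y
       if x' ≠ 0 then
         ((front ++ [x']) ++ List.replicate z 0 ++ y' :: t, (((front ++ [x']).length : Nat) : Int))
       else (front ++ List.replicate (z + 1) 0 ++ y' :: t, (front.length : Int))) := by
  have hP : front ++ List.replicate z (0 : Int) ++ x :: y :: t =
      (front ++ List.replicate z 0) ++ x :: y :: t := by simp [List.append_assoc]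
  have hi : (front.length : Int) + (z : Int) =
      (((front ++ List.replicate z (0 : Int)).length : Nat) : Int) := by push_cast; simp
  have hi1 : (front.length : Int) + (z : Int) + 1 =
      (((front ++ List.replicate z (0 : Int)).length + 1 : Nat) : Int) := by push_cast; simp
  unfold stepA
  rw [hP, hi1, hi]
  simp only [PySem.List.pyGetD_natCast, PySem.List.pySetD_natCast,
    getD_append_length, getD_append_length_succ, set_append_length, set_append_length_succ]
  by_cases hxy : x = y
  · rw [if_pos hxy]
    simp only [getD_append_length, set_append_length]
    by_cases hx : x * 2 = 0
    · rw [if_neg (by simp [hx])]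
      have hy : y = 0 := by omega
      simp [hxy, hy, List.append_assoc, rep_zero_cons, List.replicate_succ]
    · rw [if_pos (by simp [hx])]
      have h4 : (front ++ List.replicate z (0 : Int)) ++ (0 : Int) :: 0 :: t =
          front ++ (0 : Int) :: (List.replicate z 0 ++ 0 :: t) := by
        simp [List.append_assoc, rep_zero_cons]
      rw [h4, set_append_length]
      have hx' : (2 : Int) * x ≠ 0 := by omega
      have hy : ¬ y = 0 := by omega
      simp [hxy, hx', hy, List.append_assoc, rep_zero_cons, mul_comm]
  · rw [if_neg hxy]
    simp only [getD_append_length]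
    by_cases hx : x = 0
    · rw [if_neg (by simp [hx])]
      simp [hxy, hx, eq_comm, List.append_assoc, rep_zero_cons, List.replicate_succ]
    · rw [if_pos (by simp [hx])]
      rw [set_append_length]
      have h4 : (front ++ List.replicate z (0 : Int)) ++ (0 : Int) :: y :: t =
          front ++ (0 : Int) :: (List.replicate z 0 ++ y :: t) := by
        simp [List.append_assoc, rep_zero_cons]
      rw [h4, set_append_length]
      simp [hxy, hx, List.append_assoc, rep_zero_cons]

theorem sim_A (tl : List Int) (x : Int) (front : List Int) (z : Nat) :
    (PySem.List.pyRange ((front.length : Int) + z) ((front.length : Int) + z + tl.length) 1).foldl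
        stepA (front ++ List.replicate z 0 ++ x :: tl, (front.length : Int)) =
      ((absA front z x tl).1 ++ List.replicate (absA front z x tl).2.1 0 ++ [(absA front z x tl).2.2],
        ((absA front z x tl).1.length : Int)) := by
  induction tl generalizing front z x with
  | nil =>
    rw [PySem.List.pyRange_one_eq_nil (by simp)]
    simp [absA]
  | cons y t ih =>
    rw [PySem.List.pyRange_one_cons (by simp)]
    rw [List.foldl_cons, stepA_eq]
    by_cases hxy : x = y
    · by_cases hx : (2 : Int) * x = 0
      · have hy : y = 0 := by omega
        rw [if_neg (by simp [hxy, hy])]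
        simp only [if_pos hxy]
        have e1 : (front.length : Int) + (z : Int) + 1 =
            (front.length : Int) + ((z + 1 : Nat) : Int) := by push_cast; ring
        have e2 : (front.length : Int) + (z : Int) + ((y :: t).length : Int) =
            (front.length : Int) + ((z + 1 : Nat) : Int) + (t.length : Int) := by
          push_cast [List.length_cons]; ring
        rw [e2, e1, ih]
        simp [absA, hxy, hy]
      · have hy : ¬ (2 : Int) * y = 0 := by omega
        rw [if_pos (by simp [hxy, hy])]
        simp only [if_pos hxy]
        have e1 : (front.length : Int) + (z : Int) + 1 =
            (((front ++ [2 * x]).length : Nat) : Int) + (z : Int) := by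
          simp only [List.length_append, List.length_cons, List.length_nil]; push_cast; ring
        have e2 : (front.length : Int) + (z : Int) + ((y :: t).length : Int) =
            (((front ++ [2 * x]).length : Nat) : Int) + (z : Int) + (t.length : Int) := by
          simp only [List.length_append, List.length_cons, List.length_nil]; push_cast; ring
        rw [e2, e1, ih]
        simp [absA, hxy, hy]
    · by_cases hx : x = 0
      · rw [if_neg (by simp [hxy, hx])]
        simp only [if_neg hxy]
        have e1 : (front.length : Int) + (z : Int) + 1 =
            (front.length : Int) + ((z + 1 : Nat) : Int) := by push_cast; ring
        have e2 : (front.length : Int) + (z : Int) + ((y :: t).length : Int) =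
            (front.length : Int) + ((z + 1 : Nat) : Int) + (t.length : Int) := by
          push_cast [List.length_cons]; ring
        rw [e2, e1, ih]
        have h5 : (if (0 : Int) = y then (0 : Int) else y) = y := by split <;> simp_all
        simp [absA, hxy, hx, h5]
      · rw [if_pos (by simp [hxy, hx])]
        simp only [if_neg hxy]
        have e1 : (front.length : Int) + (z : Int) + 1 =
            (((front ++ [x]).length : Nat) : Int) + (z : Int) := by
          simp only [List.length_append, List.length_cons, List.length_nil]; push_cast; ring
        have e2 : (front.length : Int) + (z : Int) + ((y :: t).length : Int) =
            (((front ++ [x]).length : Nat) : Int) + (z : Int) + (t.length : Int) := by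
          simp only [List.length_append, List.length_cons, List.length_nil]; push_cast; ring
        rw [e2, e1, ih]
        simp [absA, hxy, hx]

theorem dblGo_length (x : Int) (l : List Int) : (dblGo x l).length = l.length + 1 := by
  induction l generalizing x with
  | nil => simp [dblGo]
  | cons y t ih => simp only [dblGo]; split <;> simp [ih]

theorem filt_add (l : List Int) :
    (l.filter (fun v => v ≠ 0)).length + l.countP (fun v => v = 0) = l.length := by
  induction l with
  | nil => simp
  | cons a t ih =>
    simp only [ne_eq, decide_not] at ih ⊢
    by_cases h : a = 0 <;> simp [h] <;> omega

theorem pySetD_neg_one_append (p : List Int) (x v : Int) :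
    PySem.List.pySetD (p ++ [x]) (-1) v = p ++ [v] := by
  simp [PySem.List.pySetD, PySem.List.pySet?, PySem.List.pyIdx?]

theorem pyGetD_last3 (p q : List Int) (x d : Int) :
    PySem.List.pyGetD (p ++ (q ++ [x])) (-1) d = x := by
  simpa [List.append_assoc] using PySem.List.pyGetD_neg_one_append_singleton (xs := p ++ q) (x := x) (d := d)

-- ===== VERDICT (by name: the statement is the Claim_ definition above) =====
theorem applyOperations_inPlace_spec : Claim_equal_applyOperations_inPlace := by
  intro nums hdom hpre
  unfold Spec_applyOperations_inPlace
  match nums with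
  | [] => exact absurd rfl hpre
  | x :: tl =>
    have hA := sim_A tl x [] 0
    have hB := sim_B tl x []
    have hout := absA_out tl x [] 0
    simp only [List.nil_append, List.replicate_zero, List.length_nil, Nat.cast_zero, zero_add,
      add_zero] at hA hB hout
    have hlen : (((tl.length + 1 : Nat)) : Int) - 1 = (tl.length : Int) := by push_cast; ring
    simp only [applyOperations_inPlace, applyOperations_inPlace_alt, List.length_cons, hlen,
      hB, hA]
    rcases h : absA [] 0 x tl with ⟨f, z, w⟩
    rw [h] at hout
    dsimp only
    have hfa := filt_add (dblGo x tl)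
    have hdl := dblGo_length x tl
    have hcount : tl.length + 1 - (List.filter (fun v => decide (v ≠ 0)) (dblGo x tl)).length
        = List.countP (fun v => decide (v = 0)) (dblGo x tl) := by
      simp only [ne_eq, decide_not] at hfa ⊢
      omega
    by_cases hw : w = 0
    · rw [if_neg (by simp [pyGetD_last3, hw])]
      rw [hcount]
      simpa [outA, hw] using hout
    · rw [if_pos (by simp [pyGetD_last3, hw])]
      simp only [PySem.List.pyGetD_neg_one_append_singleton, pySetD_neg_one_append,
        PySem.List.pySetD_natCast]
      have e1 : (f ++ List.replicate z 0) ++ [(0 : Int)] = f ++ (0 :: List.replicate z 0) := by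
        simpa using congrArg (f ++ ·) (rep_zero_cons z [])
      rw [e1, set_append_length, hcount]
      simpa [outA, hw, List.append_assoc] using hout
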